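-- pv_equiv track=rewrite | github.com/hiivmind/hiivmind-corpus | lib/corpus/tools/pdf_utils.py | split_subtables
-- ===== SOURCE A (Python) =====
-- def split_subtables(extract: list[list]) -> list[list[list]]:
--     """Split extracted table rows on all-empty rows into sub-tables.
--
--     Complex documents often pack multiple logical tables into one physical
--     table with empty separator rows. This splits them apart so each
--     sub-table can be processed independently.
--
--     Args:
--         extract: Raw table rows from pymupdf4llm (list of rows, each a list
--                  of cell values — strings or None).
--
--     Returns:
--         List of sub-tables, each a list of rows.
--     """
--     subtables: list[list[list]] = []
--     current: list[list] = []
--     for row in extract: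
--         if all(c is None or (isinstance(c, str) and not c.strip()) for c in row):
--             if current:
--                 subtables.append(current)
--                 current = []
--         else:
--             current.append(row)
--     if current:
--         subtables.append(current)
--     return subtables
-- ===== SOURCE B (Python) =====
-- from itertools import groupby
--
--
-- def split_subtables(extract: list[list]) -> list[list[list]]:
--     """Split extracted table rows on all-empty rows into sub-tables."""
--
--     def is_empty(row):
--         return all(c is None or (isinstance(c, str) and not c.strip()) for c in row)
--
--     return [list(g) for k, g in groupby(extract, key=is_empty) if not k]
-- ===== Notes on version B (the rewrite author's own statement) =====
-- stated objective: idiomatic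
-- what changed: Replaces A's explicit accumulate-and-flush state machine (subtables/current with a trailing flush) by itertools.groupby on an is_empty key, keeping the non-empty runs as the sub-tables.
import Mathlib
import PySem

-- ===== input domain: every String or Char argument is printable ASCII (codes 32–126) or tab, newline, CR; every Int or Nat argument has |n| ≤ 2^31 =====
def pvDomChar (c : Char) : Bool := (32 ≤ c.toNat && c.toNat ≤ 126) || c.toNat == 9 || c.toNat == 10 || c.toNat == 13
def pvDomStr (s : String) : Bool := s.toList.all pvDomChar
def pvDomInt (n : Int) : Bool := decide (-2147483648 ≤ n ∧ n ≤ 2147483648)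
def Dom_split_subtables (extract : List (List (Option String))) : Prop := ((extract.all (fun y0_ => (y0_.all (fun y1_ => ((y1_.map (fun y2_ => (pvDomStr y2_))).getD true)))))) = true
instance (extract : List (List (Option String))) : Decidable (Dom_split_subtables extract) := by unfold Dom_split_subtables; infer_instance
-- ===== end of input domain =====

-- B replaces A's explicit accumulate-and-flush state machine by grouping consecutive
-- rows by an is-empty key and keeping the non-empty runs (idiomatic decomposition).

-- shared emptiness predicate: c is None or (isinstance(c, str) and not c.strip())
def pvRowEmpty (row : List (Option String)) : Bool :=
  row.all (fun c => match c with
    | none => true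
    | some s => PySem.Str.strip s == "")

-- ===== PORT A =====
-- transliteration: fold with state (subtables, current), then the trailing flush
def split_subtables (extract : List (List (Option String))) : List (List (List (Option String))) :=
  let st := extract.foldl
    (fun (s : List (List (List (Option String))) × List (List (Option String))) row =>
      if pvRowEmpty row then
        if s.2.isEmpty then s else (s.1 ++ [s.2], [])
      else (s.1, s.2 ++ [row]))
    ([], [])
  if st.2.isEmpty then st.1 else st.1 ++ [st.2]

-- ===== PORT B =====
-- itertools.groupby(extract, key=is_empty): maximal runs of rows sharing the key
def pvGroupby (xs : List (List (Option String))) : List (Bool × List (List (Option String))) :=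
  match xs with
  | [] => []
  | r :: rs =>
    (pvRowEmpty r, r :: rs.takeWhile (fun x => pvRowEmpty x == pvRowEmpty r)) ::
      pvGroupby (rs.dropWhile (fun x => pvRowEmpty x == pvRowEmpty r))
termination_by xs.length
decreasing_by
  simpa using Nat.lt_succ_of_le (List.length_dropWhile_le _ _)

-- [list(g) for k, g in groupby(extract, key=is_empty) if not k]
def split_subtables_alt (extract : List (List (Option String))) : List (List (List (Option String))) :=
  (pvGroupby extract).filterMap (fun kg => if kg.1 then none else some kg.2)

-- ===== PRECONDITION & SPEC =====
def Spec_split_subtables (extract : List (List (Option String))) (out : List (List (List (Option String)))) : Prop := out = split_subtables_alt extract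
instance (extract : List (List (Option String))) (out : List (List (List (Option String)))) : Decidable (Spec_split_subtables extract out) := by unfold Spec_split_subtables; infer_instance

-- ===== CLAIM (what is proved, stated in full; the proofs are below) =====
def Claim_equal_split_subtables : Prop := ∀ (extract : List (List (Option String))), Dom_split_subtables extract → Spec_split_subtables extract (split_subtables extract)

-- ===== LEMMAS AND PROOFS =====

-- A's loop, written as a structural recursion on the rows (state = current)
def pvH (cur : List (List (Option String))) (xs : List (List (Option String))) :
    List (List (List (Option String))) :=
  match xs with
  | [] => if cur.isEmpty then [] else [cur]
  | r :: rs =>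
    if pvRowEmpty r then (if cur.isEmpty then [] else [cur]) ++ pvH [] rs
    else pvH (cur ++ [r]) rs

theorem pvGroupby_nil : pvGroupby [] = [] := by
  rw [pvGroupby.eq_def]

theorem pvGroupby_cons (r : List (Option String)) (rs : List (List (Option String))) :
    pvGroupby (r :: rs) =
      (pvRowEmpty r, r :: rs.takeWhile (fun x => pvRowEmpty x == pvRowEmpty r)) ::
        pvGroupby (rs.dropWhile (fun x => pvRowEmpty x == pvRowEmpty r)) := by
  rw [pvGroupby.eq_def]

theorem pvAlt_nil : split_subtables_alt [] = [] := by
  simp [split_subtables_alt, pvGroupby_nil]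

theorem pvAlt_cons_empty {r : List (Option String)} (rs : List (List (Option String)))
    (hr : pvRowEmpty r = true) :
    split_subtables_alt (r :: rs) =
      split_subtables_alt (rs.dropWhile (fun x => pvRowEmpty x == true)) := by
  simp [split_subtables_alt, pvGroupby_cons, hr]

theorem pvAlt_cons_nonempty {r : List (Option String)} (rs : List (List (Option String)))
    (hr : pvRowEmpty r = false) :
    split_subtables_alt (r :: rs) =
      (r :: rs.takeWhile (fun x => pvRowEmpty x == false)) ::
        split_subtables_alt (rs.dropWhile (fun x => pvRowEmpty x == false)) := by
  simp [split_subtables_alt, pvGroupby_cons, hr]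

-- a leading all-empty row never contributes a sub-table
theorem pvAlt_empty_cons {r : List (Option String)} (rs : List (List (Option String)))
    (hr : pvRowEmpty r = true) :
    split_subtables_alt (r :: rs) = split_subtables_alt rs := by
  cases rs with
  | nil => rw [pvAlt_cons_empty [] hr]; simp
  | cons s ss =>
    by_cases hs : pvRowEmpty s
    · rw [pvAlt_cons_empty (s :: ss) hr, pvAlt_cons_empty ss hs]
      simp [hs]
    · rw [pvAlt_cons_empty (s :: ss) hr]
      simp [hs]

-- characterisation of A's loop: with an empty accumulator it computes B's grouping,
-- with a non-empty accumulator it extends the current non-empty run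
theorem pvH_spec (xs : List (List (Option String))) :
    (pvH [] xs = split_subtables_alt xs) ∧
    (∀ cur : List (List (Option String)), cur ≠ [] →
      pvH cur xs =
        (cur ++ xs.takeWhile (fun x => pvRowEmpty x == false)) ::
          split_subtables_alt (xs.dropWhile (fun x => pvRowEmpty x == false))) := by
  induction xs with
  | nil =>
    constructor
    · simp [pvH, pvAlt_nil]
    · intro cur hc
      simp [pvH, pvAlt_nil, List.isEmpty_iff, hc]
  | cons r rs ih =>
    obtain ⟨ih1, ih2⟩ := ih
    constructor
    · by_cases hr : pvRowEmpty r
      · rw [pvH]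
        simp only [hr, List.isEmpty_nil, ite_true, List.nil_append]
        rw [ih1, pvAlt_empty_cons rs hr]
      · rw [pvH]
        simp only [hr, Bool.false_eq_true, ite_false, List.nil_append]
        rw [ih2 [r] (by simp), pvAlt_cons_nonempty rs (by simpa using hr)]
        simp
    · intro cur hc
      by_cases hr : pvRowEmpty r
      · rw [pvH]
        simp only [hr, List.isEmpty_iff, if_neg hc, ite_true]
        rw [ih1, List.takeWhile_cons, List.dropWhile_cons]
        simp [hr, pvAlt_empty_cons rs hr]
      · rw [pvH]
        simp only [hr, Bool.false_eq_true, ite_false]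
        rw [ih2 (cur ++ [r]) (by simp)]
        rw [List.takeWhile_cons, List.dropWhile_cons]
        simp [hr]

-- A's fold-with-flush equals the recursion pvH, for every starting state
theorem pvFoldl_eq_pvH (xs : List (List (Option String))) :
    ∀ (subs : List (List (List (Option String)))) (cur : List (List (Option String))),
    (if (xs.foldl
          (fun (s : List (List (List (Option String))) × List (List (Option String))) row =>
            if pvRowEmpty row then
              if s.2.isEmpty then s else (s.1 ++ [s.2], [])
            else (s.1, s.2 ++ [row]))
          (subs, cur)).2.isEmpty
     then (xs.foldl
          (fun (s : List (List (List (Option String))) × List (List (Option String))) row =>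
            if pvRowEmpty row then
              if s.2.isEmpty then s else (s.1 ++ [s.2], [])
            else (s.1, s.2 ++ [row]))
          (subs, cur)).1
     else (xs.foldl
          (fun (s : List (List (List (Option String))) × List (List (Option String))) row =>
            if pvRowEmpty row then
              if s.2.isEmpty then s else (s.1 ++ [s.2], [])
            else (s.1, s.2 ++ [row]))
          (subs, cur)).1 ++ [(xs.foldl
          (fun (s : List (List (List (Option String))) × List (List (Option String))) row =>
            if pvRowEmpty row then
              if s.2.isEmpty then s else (s.1 ++ [s.2], [])
            else (s.1, s.2 ++ [row]))
          (subs, cur)).2]) = subs ++ pvH cur xs := by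
  induction xs with
  | nil =>
    intro subs cur
    rw [pvH]
    simp only [List.foldl_nil]
    by_cases hc : cur.isEmpty <;> simp [hc]
  | cons r rs ih =>
    intro subs cur
    rw [List.foldl_cons, pvH]
    by_cases hr : pvRowEmpty r
    · by_cases hc : cur.isEmpty
      · rw [List.isEmpty_iff] at hc
        subst hc
        simp only [hr, List.isEmpty_nil, ite_true, List.nil_append]
        exact ih subs []
      · have hc' : cur.isEmpty = false := by simpa using hc
        simp only [hr, hc', ite_true, ite_false, Bool.false_eq_true]
        rw [ih (subs ++ [cur]) []]
        simp
    · simp only [hr, Bool.false_eq_true, ite_false]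
      exact ih subs (cur ++ [r])

-- ===== VERDICT (by name: the statement is the Claim_ definition above) =====
theorem split_subtables_spec : Claim_equal_split_subtables := by
  intro extract _
  unfold Spec_split_subtables split_subtables
  rw [pvFoldl_eq_pvH extract [] []]
  simp [(pvH_spec extract).1]
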